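-- pv_equiv track=rewrite | github.com/jareddrayton/Advent-of-Code | advent_of_code_2024/day_05_print_queue/day_05.py | check
-- ===== SOURCE A (Python) =====
-- def check(page_orders, page, adjacent, direction):
--     if not adjacent:
--         return True
--     if direction == "r":
--         for update in page_orders:
--             for n in adjacent:
--                 if update == (n, page):
--                     return False
--     if direction == "l":
--         for update in page_orders:
--             for n in adjacent:
--                 if update == (page, n):
--                     return False
--     return True
-- ===== SOURCE B (Python) =====
-- def check(page_orders, page, adjacent, direction):
--     if not adjacent:
--         return True
--     if direction == "r":
--         targets = {(n, page) for n in adjacent}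
--     elif direction == "l":
--         targets = {(page, n) for n in adjacent}
--     else:
--         return True
--     return not (set(page_orders) & targets)
-- ===== Notes on version B (the rewrite author's own statement) =====
-- stated objective: simpler
-- what changed: Replaces the nested rescan of page_orders for every adjacent element by building a set of forbidden pairs once per direction and deciding the answer with a single set intersection.
import Mathlib
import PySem

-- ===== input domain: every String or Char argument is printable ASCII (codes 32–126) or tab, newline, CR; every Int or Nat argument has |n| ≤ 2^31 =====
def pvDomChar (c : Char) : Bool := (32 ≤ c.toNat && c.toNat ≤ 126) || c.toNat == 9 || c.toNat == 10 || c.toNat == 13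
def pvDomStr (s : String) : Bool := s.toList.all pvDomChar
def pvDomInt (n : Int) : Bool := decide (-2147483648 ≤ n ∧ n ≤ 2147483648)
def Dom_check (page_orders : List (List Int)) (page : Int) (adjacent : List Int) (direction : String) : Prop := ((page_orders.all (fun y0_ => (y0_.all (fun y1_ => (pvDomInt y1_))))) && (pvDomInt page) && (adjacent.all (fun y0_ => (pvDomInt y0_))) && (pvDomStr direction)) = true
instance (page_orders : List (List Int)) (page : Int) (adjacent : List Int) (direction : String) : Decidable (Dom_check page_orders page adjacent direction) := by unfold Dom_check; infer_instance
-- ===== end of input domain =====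

-- B builds the set of forbidden pairs once and decides by one set intersection, instead of
-- rescanning page_orders for every adjacent element (objective: simpler).

-- ===== PORT A =====
-- the tuples (n, page)/(page, n) of the Python are two-element rows, ported as [n, page]/[page, n]
def check (page_orders : List (List Int)) (page : Int) (adjacent : List Int) (direction : String) : Bool :=
  if adjacent.isEmpty then true
  else if direction == "r" && page_orders.any (fun update => adjacent.any (fun n => update == [n, page])) then false
  else if direction == "l" && page_orders.any (fun update => adjacent.any (fun n => update == [page, n])) then false
  else true

-- ===== PORT B =====
def check_alt (page_orders : List (List Int)) (page : Int) (adjacent : List Int) (direction : String) : Bool :=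
  if adjacent.isEmpty then true
  else if direction == "r" then
    let targets : PySem.Set (List Int) := PySem.Set.ofList (adjacent.map (fun n => [n, page]))
    (PySem.Set.inter (PySem.Set.ofList page_orders) targets).isEmpty
  else if direction == "l" then
    let targets : PySem.Set (List Int) := PySem.Set.ofList (adjacent.map (fun n => [page, n]))
    (PySem.Set.inter (PySem.Set.ofList page_orders) targets).isEmpty
  else true

-- ===== PRECONDITION & SPEC =====
def Spec_check (page_orders : List (List Int)) (page : Int) (adjacent : List Int) (direction : String) (out : Bool) : Prop := out = check_alt page_orders page adjacent direction
instance (page_orders : List (List Int)) (page : Int) (adjacent : List Int) (direction : String) (out : Bool) : Decidable (Spec_check page_orders page adjacent direction out) := by unfold Spec_check; infer_instance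

-- ===== CLAIM (what is proved, stated in full; the proofs are below) =====
def Claim_equal_check : Prop := ∀ (page_orders : List (List Int)) (page : Int) (adjacent : List Int) (direction : String), Dom_check page_orders page adjacent direction → Spec_check page_orders page adjacent direction (check page_orders page adjacent direction)

-- ===== LEMMAS AND PROOFS =====

-- the intersection with the target set is empty iff no row of page_orders is a target pair
theorem inter_isEmpty_iff {page_orders : List (List Int)} {f : Int → List Int} {adjacent : List Int} :
    (PySem.Set.inter (PySem.Set.ofList page_orders) (PySem.Set.ofList (adjacent.map f))).isEmpty
      = !page_orders.any (fun update => adjacent.any (fun n => update == f n)) := by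
  rw [Bool.eq_iff_iff, List.isEmpty_iff, List.eq_nil_iff_forall_not_mem]
  simp only [Bool.not_eq_true', List.any_eq_false, List.any_eq_true, beq_iff_eq, not_exists, not_and]
  constructor
  · intro h u hu n hn hfn
    exact h u (by rw [PySem.Set.mem_inter]; simp only [PySem.Set.mem_ofList, List.mem_map];
                  exact ⟨hu, n, hn, hfn.symm⟩)
  · intro h u hu
    rw [PySem.Set.mem_inter] at hu
    simp only [PySem.Set.mem_ofList, List.mem_map] at hu
    obtain ⟨hu1, n, hn, hfn⟩ := hu
    exact h u hu1 n hn hfn.symm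

-- ===== VERDICT (by name: the statement is the Claim_ definition above) =====
theorem check_spec : Claim_equal_check := by
  intro page_orders page adjacent direction _
  unfold Spec_check check check_alt
  by_cases he : adjacent.isEmpty
  · simp [he]
  · by_cases hr : direction = "r"
    · subst hr
      simp only [he, show (("r" : String) == "r") = true from rfl,
        show (("r" : String) == "l") = false from by decide,
        Bool.true_and, Bool.false_and, Bool.false_eq_true, if_true, if_false]
      rw [inter_isEmpty_iff]
      cases page_orders.any (fun update => adjacent.any (fun n => update == [n, page])) <;> simp
    · by_cases hl : direction = "l"
      · subst hl
        simp only [he, show (("l" : String) == "r") = false from by decide,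
          show (("l" : String) == "l") = true from rfl,
          Bool.true_and, Bool.false_and, Bool.false_eq_true, if_true, if_false]
        rw [inter_isEmpty_iff]
        cases page_orders.any (fun update => adjacent.any (fun n => update == [page, n])) <;> simp
      · have h1 : (direction == "r") = false := by simpa using hr
        have h2 : (direction == "l") = false := by simpa using hl
        simp [he, h1, h2]
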